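-- pv_equiv track=rewrite | github.com/arjunkadampatil/search-engines-information-retrieval | Assignments/assignment2.py | simhash
-- ===== SOURCE A (Python) =====
-- P=53
--
-- M=2**64
--
-- def rolling_hash(word):
--     h=0
--     for i,ch in enumerate(word):
--         h+=ord(ch)*(P**i)
--     return h%M
--
-- def simhash(freq):
--     vec=[0]*64
--     for word,count in freq.items():
--         h=rolling_hash(word)
--         for i in range(64):
--             bit=(h>>i)&1
--             if bit==1:
--                 vec[i]+=count
--             else:
--                 vec[i]-=count
--     final=0
--     for i in range(64):
--         if vec[i]>0:
--             final|=(1<<i)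
--     return final
-- ===== SOURCE B (Python) =====
-- M = 2 ** 64
--
-- def simhash(freq):
--     # Group counts by fingerprint hash in a dict (reverse-Horner hash reduced mod M
--     # at each step), then set bit i iff twice the bit-set weight exceeds the total.
--     weight = {}
--     total = 0
--     for word, count in freq.items():
--         h = 0
--         for ch in reversed(word):
--             h = (h * 53 + ord(ch)) % M
--         weight[h] = weight.get(h, 0) + count
--         total += count
--     final = 0
--     for i in range(64):
--         s1 = 0
--         for h, c in weight.items():
--             if (h >> i) & 1:
--                 s1 += c
--         if 2 * s1 > total:
--             final |= 1 << i
--     return final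
-- ===== Notes on version B (the rewrite author's own statement) =====
-- stated objective: alternative
-- what changed: B hashes each word by a reverse Horner recurrence kept reduced mod 2**64 (no big-integer powers), aggregates the counts into a dict keyed by the 64-bit hash, and decides each output bit by the arithmetic threshold 2*s1 > total (s1 = summed weight of words with that bit set, total = summed counts) instead of A's 64-counter vector updated word by word.
import Mathlib
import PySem

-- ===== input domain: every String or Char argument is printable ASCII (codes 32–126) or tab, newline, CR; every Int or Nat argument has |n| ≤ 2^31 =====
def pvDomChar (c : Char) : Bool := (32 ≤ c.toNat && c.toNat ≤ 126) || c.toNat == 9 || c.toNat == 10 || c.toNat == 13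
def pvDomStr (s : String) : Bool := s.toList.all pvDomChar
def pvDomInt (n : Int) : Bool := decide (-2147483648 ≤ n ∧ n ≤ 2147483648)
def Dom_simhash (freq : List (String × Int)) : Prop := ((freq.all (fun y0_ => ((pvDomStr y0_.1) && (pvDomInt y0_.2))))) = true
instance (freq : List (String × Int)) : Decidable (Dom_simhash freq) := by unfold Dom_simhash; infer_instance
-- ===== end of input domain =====

-- B groups the counts into a dict keyed by a reverse-Horner hash reduced mod 2^64 at each
-- step and sets output bit i iff twice the bit-set weight exceeds the total count.

-- ===== PORT A =====
-- rolling_hash: h += ord(ch) * P**i over enumerate(word), then h % M.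
-- (enumerate indices are ≥ 0, so the exponent P**i is ported as 53 ^ i.toNat — exact.)
def pvRollingHash (word : String) : Int :=
  let h := (PySem.List.enumerate word.toList 0).foldl
      (fun h p => h + (p.2.toNat : Int) * 53 ^ p.1.toNat) 0
  PySem.Int.mod h (2 ^ 64)

-- range(64) has literal nonnegative bounds and step 1: ported as List.range 64 (exact).
-- vec[i] reads/writes always have 0 ≤ i < 64 = len(vec): getD/modify are exact here.
-- h >> i and & 1 are Python-exact on Int via >>> and PySem.Int.band; 1 << i is (1:Int) <<< i.
def simhash (freq : List (String × Int)) : Int :=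
  let vec0 : List Int := List.replicate 64 0
  let vec := freq.foldl (fun vec wc =>
      let h := pvRollingHash wc.1
      (List.range 64).foldl (fun v (i : Nat) =>
          if PySem.Int.band (h >>> i) 1 = 1 then v.modify i (· + wc.2)
          else v.modify i (· - wc.2)) vec) vec0
  (List.range 64).foldl (fun final (i : Nat) =>
      if vec.getD i 0 > 0 then PySem.Int.bor final ((1 : Int) <<< i) else final) 0

-- ===== PORT B =====
-- reversed(word) → word.toList.reverse; the dict update weight[h] = weight.get(h,0)+count
-- is Dict.insert after getD; '(h >> i) & 1' is truthy iff nonzero.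
def simhash_alt (freq : List (String × Int)) : Int :=
  let st := freq.foldl (fun (st : PySem.Dict Int Int × Int) wc =>
      let h := wc.1.toList.reverse.foldl
          (fun (h : Int) ch => PySem.Int.mod (h * 53 + (ch.toNat : Int)) (2 ^ 64)) 0
      (st.1.insert h (st.1.getD h 0 + wc.2), st.2 + wc.2)) (PySem.Dict.empty, 0)
  (List.range 64).foldl (fun final (i : Nat) =>
      let s1 := st.1.items.foldl (fun s (hc : Int × Int) =>
          if PySem.Int.band (hc.1 >>> i) 1 ≠ 0 then s + hc.2 else s) 0
      if 2 * s1 > st.2 then PySem.Int.bor final ((1 : Int) <<< i) else final) 0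

-- ===== PRECONDITION & SPEC =====
def Spec_simhash (freq : List (String × Int)) (out : Int) : Prop := out = simhash_alt freq
instance (freq : List (String × Int)) (out : Int) : Decidable (Spec_simhash freq out) := by unfold Spec_simhash; infer_instance

-- ===== CLAIM (what is proved, stated in full; the proofs are below) =====
def Claim_equal_simhash : Prop := ∀ (freq : List (String × Int)), Dom_simhash freq → Spec_simhash freq (simhash freq)

-- ===== LEMMAS AND PROOFS =====

-- the word polynomial Σ ord(ch_j) * 53^j, written in Horner form
def pvPoly (l : List Char) : Int := l.foldr (fun ch acc => (ch.toNat : Int) + 53 * acc) 0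

-- B's reverse modular Horner step
def pvHStep (h : Int) (ch : Char) : Int :=
  PySem.Int.mod (h * 53 + (ch.toNat : Int)) (2 ^ 64)

-- the ±count contribution of a word with hash h to bit i
def pvContrib (i : Nat) (h c : Int) : Int :=
  if PySem.Int.band (h >>> i) 1 = 1 then c else -c

def pvSsum (i : Nat) (freq : List (String × Int)) : Int :=
  (freq.map (fun wc => pvContrib i (pvRollingHash wc.1) wc.2)).sum

-- 0/1 indicator of bit i of h
def pvGbit (i : Nat) (h : Int) : Int :=
  if PySem.Int.band (h >>> i) 1 = 1 then 1 else 0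

-- weighted sum Σ g(key) * value over an items list
def pvWsum (g : Int → Int) (l : List (Int × Int)) : Int :=
  (l.map (fun p => g p.1 * p.2)).sum

lemma pvEmod_modEq (a n : Int) : a % n ≡ a [ZMOD n] := by
  unfold Int.ModEq; simp [Int.emod_emod_of_dvd]

lemma pvA_enum_fold (l : List Char) : ∀ (k : Nat) (h0 : Int),
    (PySem.List.enumerate l (k : Int)).foldl
      (fun h p => h + (p.2.toNat : Int) * 53 ^ p.1.toNat) h0
      = h0 + 53 ^ k * pvPoly l := by
  induction l with
  | nil => intro k h0; simp [PySem.List.enumerate_nil, pvPoly]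
  | cons c t ih =>
    intro k h0
    rw [PySem.List.enumerate_cons, List.foldl_cons]
    have : ((k : Int) + 1) = ((k + 1 : Nat) : Int) := by push_cast; ring
    rw [this, ih (k + 1)]
    simp [pvPoly, pow_succ]
    ring

-- the plain (unreduced) reverse Horner fold computes 53^|l| * h0 + poly l
lemma pvPlain_rev_fold (l : List Char) : ∀ (h0 : Int),
    l.reverse.foldl (fun h ch => h * 53 + (ch.toNat : Int)) h0
      = 53 ^ l.length * h0 + pvPoly l := by
  induction l with
  | nil => intro h0; simp [pvPoly]
  | cons c t ih =>
    intro h0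
    rw [List.reverse_cons, List.foldl_append, List.foldl_cons, List.foldl_nil, ih]
    simp [pvPoly, pow_succ]
    ring

-- the modular fold stays in [0, 2^64) and is congruent to the plain fold
lemma pvMod_fold (l : List Char) : ∀ (h0 h0' : Int), 0 ≤ h0 → h0 < 2 ^ 64 →
    h0 ≡ h0' [ZMOD (2 ^ 64)] →
    0 ≤ l.foldl pvHStep h0 ∧ l.foldl pvHStep h0 < 2 ^ 64 ∧
    l.foldl pvHStep h0 ≡ l.foldl (fun h ch => h * 53 + (ch.toNat : Int)) h0' [ZMOD (2 ^ 64)] := by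
  induction l with
  | nil => intro h0 h0' hl hu hc; exact ⟨hl, hu, hc⟩
  | cons c t ih =>
    intro h0 h0' hl hu hc
    rw [List.foldl_cons, List.foldl_cons]
    have hpos : (0:Int) < 2 ^ 64 := by norm_num
    have hstep : pvHStep h0 c = (h0 * 53 + (c.toNat : Int)) % 2 ^ 64 := by
      simp [pvHStep, pysem]
    have hcong : (h0 * 53 + (c.toNat : Int)) % 2 ^ 64
        ≡ h0' * 53 + (c.toNat : Int) [ZMOD (2 ^ 64)] :=
      (pvEmod_modEq _ _).trans (Int.ModEq.add_right _ (hc.mul_right 53))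
    have := ih ((h0 * 53 + (c.toNat : Int)) % 2 ^ 64) (h0' * 53 + (c.toNat : Int))
      (Int.emod_nonneg _ (by norm_num)) (Int.emod_lt_of_pos _ hpos) hcong
    rw [hstep]
    exact this

-- B's inline hash loop equals A's rolling_hash
lemma pvHash_eq (w : String) :
    w.toList.reverse.foldl
        (fun (h : Int) ch => PySem.Int.mod (h * 53 + (ch.toNat : Int)) (2 ^ 64)) 0
      = pvRollingHash w := by
  have hfold : w.toList.reverse.foldl
      (fun (h : Int) ch => PySem.Int.mod (h * 53 + (ch.toNat : Int)) (2 ^ 64)) 0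
      = w.toList.reverse.foldl pvHStep 0 := rfl
  rw [hfold]
  obtain ⟨b1, b2, hc⟩ := pvMod_fold w.toList.reverse 0 0 le_rfl (by norm_num) (by rfl)
  rw [pvPlain_rev_fold] at hc
  have h1 : (w.toList.reverse.foldl pvHStep 0) % 2 ^ 64
      = (53 ^ w.toList.length * 0 + pvPoly w.toList) % 2 ^ 64 := hc
  rw [Int.emod_eq_of_lt b1 b2] at h1
  have hA : (PySem.List.enumerate w.toList 0).foldl
      (fun h p => h + (p.2.toNat : Int) * 53 ^ p.1.toNat) 0
      = ((0 : Nat) : Int) + 53 ^ (0 : Nat) * pvPoly w.toList := by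
    have := pvA_enum_fold w.toList 0 0
    simpa using this
  simp only [pvRollingHash]
  rw [hA, PySem.Int.mod_eq_emod_of_pos (by norm_num), h1]
  norm_num

-- A's inner 64-bit loop, elementwise
lemma pvInner_get (h c : Int) (n : Nat) (vec : List Int) (j : Nat) :
    ((List.range n).foldl (fun v (i : Nat) =>
        if PySem.Int.band (h >>> i) 1 = 1 then v.modify i (· + c)
        else v.modify i (· - c)) vec)[j]?
      = if j < n then vec[j]?.map (· + pvContrib j h c) else vec[j]? := by
  induction n generalizing vec with
  | zero => simp
  | succ n ih =>
    rw [List.range_succ, List.foldl_append, List.foldl_cons, List.foldl_nil]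
    have key : ∀ (v : List Int),
        (if PySem.Int.band (h >>> n) 1 = 1 then v.modify n (· + c) else v.modify n (· - c))[j]?
          = v[j]?.map (fun a => if n = j then a + pvContrib n h c else a) := by
      intro v
      by_cases hb : PySem.Int.band (h >>> n) 1 = 1 <;>
        simp [hb, List.getElem?_modify, pvContrib] <;>
        (cases v[j]? <;> simp) <;> (by_cases hj : n = j <;> simp [hj]) <;> ring
    rw [key, ih]
    rcases lt_trichotomy j n with hj | hj | hj
    · have h1 : j < n + 1 := by omega
      have h2 : n ≠ j := by omega
      simp [hj, h1, h2, Option.map_map]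
      rfl
    · subst hj
      simp
    · have h1 : ¬ j < n := by omega
      have h2 : ¬ j < n + 1 := by omega
      have h3 : n ≠ j := by omega
      simp [h1, h2, h3]

-- A's word loop, elementwise
lemma pvOuter_get (freq : List (String × Int)) : ∀ (vec : List Int) (j : Nat), j < 64 →
    (freq.foldl (fun vec wc =>
        (List.range 64).foldl (fun v (i : Nat) =>
            if PySem.Int.band (pvRollingHash wc.1 >>> i) 1 = 1 then v.modify i (· + wc.2)
            else v.modify i (· - wc.2)) vec) vec)[j]?
      = vec[j]?.map (· + pvSsum j freq) := by
  induction freq with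
  | nil =>
    intro vec j hj
    cases h : vec[j]? <;> simp [pvSsum, h]
  | cons wc t ih =>
    intro vec j hj
    rw [List.foldl_cons, ih _ j hj, pvInner_get, if_pos hj]
    have hsum : pvSsum j (wc :: t) = pvContrib j (pvRollingHash wc.1) wc.2 + pvSsum j t := by
      simp [pvSsum]
    rw [hsum]
    (cases vec[j]? <;> simp) <;> ring

lemma pvBand01 (x : Int) : PySem.Int.band x 1 = 0 ∨ PySem.Int.band x 1 = 1 := by
  rw [PySem.Int.band_one]
  have h1 := PySem.Int.mod_nonneg x (b := 2) (by norm_num)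
  have h2 := PySem.Int.mod_lt x (b := 2) (by norm_num)
  omega

-- B's inner bit-sum loop is the weighted sum with the 0/1 indicator
lemma pvS1_foldl (i : Nat) (l : List (Int × Int)) : ∀ (s0 : Int),
    l.foldl (fun s (hc : Int × Int) =>
        if PySem.Int.band (hc.1 >>> i) 1 ≠ 0 then s + hc.2 else s) s0
      = s0 + pvWsum (pvGbit i) l := by
  induction l with
  | nil => intro s0; simp [pvWsum]
  | cons hc t ih =>
    intro s0
    rw [List.foldl_cons, ih]
    have hcase : (if PySem.Int.band (hc.1 >>> i) 1 ≠ 0 then s0 + hc.2 else s0)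
        = s0 + pvGbit i hc.1 * hc.2 := by
      rcases pvBand01 (hc.1 >>> i) with hb | hb <;> simp [hb, pvGbit]
    rw [hcase]
    simp [pvWsum]
    ring

-- replacing the unique entry at key k changes the weighted sum by g k * (w - v)
lemma pvWsum_replace (g : Int → Int) (k v w : Int) : ∀ (l : List (Int × Int)),
    (l.map Prod.fst).Nodup → (k, v) ∈ l →
    pvWsum g (l.map (fun p => if p.1 == k then (k, w) else p))
      = pvWsum g l + g k * (w - v) := by
  intro l
  induction l with
  | nil => intro _ hm; simp at hm
  | cons p t ih =>
    intro hnd hm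
    rw [List.map_cons] at hnd ⊢
    have hnd' := hnd
    rw [List.nodup_cons] at hnd'
    by_cases hk : p.1 = k
    · have hv : p = (k, v) := by
        rcases List.mem_cons.mp hm with h | h
        · exact h.symm ▸ h ▸ rfl
        · exact absurd (hk ▸ (List.mem_map.mpr ⟨(k, v), h, rfl⟩) : p.1 ∈ t.map Prod.fst)
            (by simpa [hk] using hnd'.1)
      have hid : t.map (fun p => if p.1 == k then (k, w) else p) = t.map id := by
        apply List.map_congr_left
        intro q hq
        have : q.1 ≠ k := by
          intro hqk
          exact (hk ▸ hnd'.1) (hqk ▸ List.mem_map.mpr ⟨q, hq, rfl⟩)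
        simp [this]
      rw [List.map_id] at hid
      subst hv
      simp only [pvWsum, List.map_cons, List.sum_cons, hid, beq_self_eq_true, if_true]
      ring
    · have hm' : (k, v) ∈ t := by
        rcases List.mem_cons.mp hm with h | h
        · exact absurd (congrArg Prod.fst h.symm) hk
        · exact h
      have hne : (p.1 == k) = false := by simp [hk]
      have := ih hnd'.2 hm'
      simp only [pvWsum, List.map_cons, List.sum_cons, hne, Bool.false_eq_true,
        if_false] at this ⊢
      rw [this]
      ring

-- one dict update weight[k] = weight.get(k,0) + c shifts every weighted sum by g k * c
lemma pvWsum_insert (g : Int → Int) (d : PySem.Dict Int Int) (k c : Int)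
    (hnd : d.keys.Nodup) :
    pvWsum g ((d.insert k (d.getD k 0 + c)).items) = pvWsum g d.items + g k * c := by
  by_cases hcon : d.contains k
  · have hsome : (d.get? k).isSome := by rw [← PySem.Dict.contains_eq_isSome_get? d k, hcon]
    obtain ⟨v, hv⟩ := Option.isSome_iff_exists.mp hsome
    have hgetD : d.getD k 0 = v := PySem.Dict.getD_of_get?_eq_some d 0 hv
    have hmem : (k, v) ∈ d.items := PySem.Dict.mem_items_of_get?_eq_some d hv
    rw [PySem.Dict.items_insert_of_contains d (d.getD k 0 + c) hcon, hgetD,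
      pvWsum_replace g k v (v + c) d.items hnd hmem]
    ring
  · rw [PySem.Dict.items_insert_of_not_contains d (d.getD k 0 + c) (by simpa using hcon),
      PySem.Dict.getD_of_not_contains d 0 (by simpa using hcon)]
    simp [pvWsum]

-- B's accumulation loop: keys stay unique, the total is the sum of counts, and every
-- weighted sum over the dict equals the per-word sum of g(hash) * count
lemma pvStFold (freq : List (String × Int)) : ∀ (d : PySem.Dict Int Int) (tot : Int),
    d.keys.Nodup →
    (freq.foldl (fun (st : PySem.Dict Int Int × Int) wc =>
        (st.1.insert (pvRollingHash wc.1) (st.1.getD (pvRollingHash wc.1) 0 + wc.2),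
         st.2 + wc.2)) (d, tot)).1.keys.Nodup ∧
    (freq.foldl (fun (st : PySem.Dict Int Int × Int) wc =>
        (st.1.insert (pvRollingHash wc.1) (st.1.getD (pvRollingHash wc.1) 0 + wc.2),
         st.2 + wc.2)) (d, tot)).2 = tot + (freq.map (·.2)).sum ∧
    ∀ g, pvWsum g (freq.foldl (fun (st : PySem.Dict Int Int × Int) wc =>
        (st.1.insert (pvRollingHash wc.1) (st.1.getD (pvRollingHash wc.1) 0 + wc.2),
         st.2 + wc.2)) (d, tot)).1.items
      = pvWsum g d.items + (freq.map (fun wc => g (pvRollingHash wc.1) * wc.2)).sum := by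
  induction freq with
  | nil => intro d tot hnd; exact ⟨hnd, by simp, fun g => by simp⟩
  | cons wc t ih =>
    intro d tot hnd
    rw [List.foldl_cons]
    obtain ⟨ihnd, ihtot, ihw⟩ := ih
      (d.insert (pvRollingHash wc.1) (d.getD (pvRollingHash wc.1) 0 + wc.2)) (tot + wc.2)
      (PySem.Dict.nodup_keys_insert d _ _ hnd)
    refine ⟨ihnd, ?_, ?_⟩
    · rw [ihtot]; simp; ring
    · intro g
      rw [ihw g, pvWsum_insert g d _ _ hnd]
      simp
      ring

-- the ± contribution is twice the indicator weight minus the count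
lemma pvContrib_eq (i : Nat) (h c : Int) : pvContrib i h c = 2 * (pvGbit i h * c) - c := by
  rcases pvBand01 (h >>> i) with hb | hb <;> simp [pvContrib, pvGbit, hb] <;> ring

lemma pvSsum_eq (i : Nat) (freq : List (String × Int)) :
    pvSsum i freq
      = 2 * (freq.map (fun wc => pvGbit i (pvRollingHash wc.1) * wc.2)).sum
        - (freq.map (·.2)).sum := by
  induction freq with
  | nil => simp [pvSsum]
  | cons wc t ih =>
    simp only [pvSsum, List.map_cons, List.sum_cons] at ih ⊢
    rw [ih, pvContrib_eq]
    ring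

-- ===== VERDICT (by name: the statement is the Claim_ definition above) =====
theorem simhash_spec : Claim_equal_simhash := by
  intro freq _
  show simhash freq = simhash_alt freq
  simp only [simhash, simhash_alt, pvHash_eq]
  apply PySem.List.foldl_congr_mem'
  intro i hi acc
  have hi64 : i < 64 := List.mem_range.mp hi
  obtain ⟨hnd, htot, hw⟩ := pvStFold freq PySem.Dict.empty 0 PySem.Dict.nodup_keys_empty
  have hA : (freq.foldl (fun vec wc =>
      (List.range 64).foldl (fun v (i : Nat) =>
          if PySem.Int.band (pvRollingHash wc.1 >>> i) 1 = 1 then v.modify i (· + wc.2)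
          else v.modify i (· - wc.2)) vec) (List.replicate 64 0))[i]?
      = some (0 + pvSsum i freq) := by
    rw [pvOuter_get freq _ i hi64, List.getElem?_replicate, if_pos hi64]
    rfl
  rw [List.getD_eq_getElem?_getD, hA, pvS1_foldl, htot, hw (pvGbit i)]
  have hempty : pvWsum (pvGbit i) (PySem.Dict.empty : PySem.Dict Int Int).items = 0 := by
    simp [pvWsum, PySem.Dict.empty]
  rw [hempty, pvSsum_eq i freq]
  simp only [Option.getD_some, zero_add]
  by_cases hgt : 2 * (freq.map (fun wc => pvGbit i (pvRollingHash wc.1) * wc.2)).sum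
      - (freq.map (·.2)).sum > 0
  · rw [if_pos hgt, if_pos (by linarith)]
  · rw [if_neg hgt, if_neg (by intro h; apply hgt; linarith)]
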